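-- pv_equiv track=rewrite | github.com/UPVEX/Every_day_python | power_range.py | power_range
-- ===== SOURCE A (Python) =====
-- def power_range(n,a,b):
--
--     count = 0
--     list_number = []
--     for i in range(1, b+1):
--
--         if (((i ** n) >= a) and ((i ** n) <= b)):
--             count = count + 1
--             list_number.append(i)
--
--     return count, list_number
-- ===== SOURCE B (Python) =====
-- def _pow_min(i, n, b):
--     # i**n for i >= 2, n >= 1, except that the product stops early once it
--     # exceeds b (the returned value is then still > b).
--     if i == 1:
--         return 1
--     r = 1
--     for _ in range(n):
--         r *= i
--         if r > b:
--             break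
--     return r
--
--
-- def power_range(n, a, b):
--     if b < 1:
--         return 0, []
--     if n == 0:
--         # i**0 == 1 for every i, so either everything or nothing qualifies
--         if a <= 1:
--             return b, list(range(1, b + 1))
--         return 0, []
--     if n < 0:
--         # i**n is 1.0 for i == 1 and a value strictly between 0 and 1 for i >= 2
--         if a <= 0:
--             return b, list(range(1, b + 1))
--         if a == 1:
--             return 1, [1]
--         return 0, []
--     # n >= 1: i**n is increasing, so only i up to the n-th root of b can qualify
--     hits = []
--     i = 1
--     while True:
--         p = _pow_min(i, n, b)
--         if p > b:
--             break
--         if p >= a: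
--             hits.append(i)
--         i += 1
--     return len(hits), hits
-- ===== Notes on version B (the rewrite author's own statement) =====
-- stated objective: faster
-- what changed: Instead of testing every i in [1,b], B handles n<=0 by closed-form case analysis and for n>=1 scans only the contiguous prefix of candidates, stopping at the integer n-th root of b using a capped power that aborts the product as soon as it exceeds b.
import Mathlib
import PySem

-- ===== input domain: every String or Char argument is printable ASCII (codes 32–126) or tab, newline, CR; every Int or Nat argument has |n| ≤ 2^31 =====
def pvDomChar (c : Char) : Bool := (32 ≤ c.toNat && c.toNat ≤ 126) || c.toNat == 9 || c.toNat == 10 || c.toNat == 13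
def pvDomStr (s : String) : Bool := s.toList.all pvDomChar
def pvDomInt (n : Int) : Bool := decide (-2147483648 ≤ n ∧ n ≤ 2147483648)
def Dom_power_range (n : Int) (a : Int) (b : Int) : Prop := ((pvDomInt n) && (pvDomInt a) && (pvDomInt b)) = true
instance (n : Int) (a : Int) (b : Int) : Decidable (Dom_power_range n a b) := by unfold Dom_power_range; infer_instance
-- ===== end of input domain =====

-- B replaces A's scan of all of [1,b] by closed forms for n ≤ 0 and, for n ≥ 1, a scan that
-- stops at the integer n-th root of b (objective: faster).

-- ===== PORT A =====
-- Python's `a <= i ** n <= b` for i ≥ 1, ported exactly: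
-- for n ≥ 0, i ** n is the integer i^n; for n < 0, i ** n is a float equal to 1.0 when
-- i = 1 and lying strictly between 0 and 1/2·(1+ε) < 1 when i ≥ 2 (possibly underflowing
-- to 0.0, still ≥ 0 and < 1), so comparing it with the integers a and b is exactly
-- a ≤ 1 ∧ 1 ≤ b (i = 1) resp. a ≤ 0 ∧ 1 ≤ b (i ≥ 2, the float being in [0,1)).
def pyPowBetween (i n a b : Int) : Bool :=
  if 0 ≤ n then decide (a ≤ i ^ n.toNat) && decide (i ^ n.toNat ≤ b)
  else if i = 1 then decide (a ≤ 1) && decide ((1 : Int) ≤ b)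
  else decide (a ≤ 0) && decide ((1 : Int) ≤ b)

def power_range (n : Int) (a : Int) (b : Int) : Int × List Int :=
  (PySem.List.pyRange 1 (b + 1) 1).foldl
    (fun st i => if pyPowBetween i n a b then (st.1 + 1, st.2 ++ [i]) else st)
    (0, [])

-- ===== PORT B =====
-- `_pow_min`'s inner for-loop with early break:
def powMinGo (i b : Int) : Int → Nat → Int
  | r, 0 => r
  | r, k + 1 => if r * i > b then r * i else powMinGo i b (r * i) k

def powMin (i n b : Int) : Int :=
  if i = 1 then 1 else powMinGo i b 1 n.toNat

-- the while-loop of B for n ≥ 1 (fuel = b + 1 - i bounds the number of iterations)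
def altLoop (n a b : Int) : Int → List Int → Nat → Int × List Int
  | _, hits, 0 => ((hits.length : Int), hits)
  | i, hits, fuel + 1 =>
    let p := powMin i n b
    if p > b then ((hits.length : Int), hits)
    else altLoop n a b (i + 1) (if p ≥ a then hits ++ [i] else hits) fuel

def power_range_alt (n : Int) (a : Int) (b : Int) : Int × List Int :=
  if b < 1 then (0, [])
  else if n = 0 then
    (if a ≤ 1 then (b, PySem.List.pyRange 1 (b + 1) 1) else (0, []))
  else if n < 0 then
    (if a ≤ 0 then (b, PySem.List.pyRange 1 (b + 1) 1)
     else if a = 1 then (1, [1]) else (0, []))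
  else altLoop n a b 1 [] (b + 1).toNat

-- ===== PRECONDITION & SPEC =====
def Spec_power_range (n : Int) (a : Int) (b : Int) (out : Int × List Int) : Prop := out = power_range_alt n a b
instance (n : Int) (a : Int) (b : Int) (out : Int × List Int) : Decidable (Spec_power_range n a b out) := by unfold Spec_power_range; infer_instance

-- ===== CLAIM (what is proved, stated in full; the proofs are below) =====
def Claim_equal_power_range : Prop := ∀ (n : Int) (a : Int) (b : Int), Dom_power_range n a b → Spec_power_range n a b (power_range n a b)

-- ===== LEMMAS AND PROOFS =====

-- A's fold builds the filtered list together with its length.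
theorem foldA (n a b : Int) (l : List Int) (c : Int) (h : List Int) :
    l.foldl (fun st i => if pyPowBetween i n a b then (st.1 + 1, st.2 ++ [i]) else st) (c, h)
      = (c + ((l.filter (fun i => pyPowBetween i n a b)).length : Int),
         h ++ l.filter (fun i => pyPowBetween i n a b)) := by
  induction l generalizing c h with
  | nil => simp
  | cons x xs ih =>
    by_cases hx : pyPowBetween x n a b = true
    · simp [List.foldl_cons, hx, ih, List.filter_cons]
      omega
    · simp [List.foldl_cons, hx, ih, List.filter_cons]

theorem powMinGo_spec (i b : Int) (hi : 2 ≤ i) :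
    ∀ (k : Nat) (r : Int), 1 ≤ r →
      (if r * i ^ k ≤ b then powMinGo i b r k = r * i ^ k else b < powMinGo i b r k) := by
  intro k
  induction k with
  | zero => intro r hr; simp [powMinGo]
  | succ k ih =>
    intro r hr
    have hpos : (0:Int) < i ^ k := pow_pos (by omega) k
    have hri : 1 ≤ r * i := by nlinarith
    by_cases hb : r * i > b
    · have : ¬ r * i ^ (k + 1) ≤ b := by
        have : r * i ≤ r * i * i ^ k := by nlinarith
        rw [pow_succ]; nlinarith [this]
      simp [powMinGo, hb, this]
    · have := ih (r * i) hri
      have heq : r * i * i ^ k = r * i ^ (k + 1) := by ring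
      rw [heq] at this
      simpa [powMinGo, hb] using this

-- powMin compared with b decides i^n ≤ b, and equals i^n when that holds (i ≥ 1).
theorem powMin_le (i n b : Int) (hi : 1 ≤ i) (h : powMin i n b ≤ b) :
    powMin i n b = i ^ n.toNat ∧ i ^ n.toNat ≤ b := by
  by_cases h1 : i = 1
  · subst h1; simpa [powMin] using h
  · have hi2 : 2 ≤ i := by omega
    have := powMinGo_spec i b hi2 n.toNat 1 (by omega)
    simp only [one_mul] at this
    unfold powMin at h ⊢
    simp only [h1, if_false] at h ⊢
    by_cases hle : i ^ n.toNat ≤ b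
    · simp [hle] at this; exact ⟨this, hle⟩
    · simp [hle] at this; omega

theorem powMin_gt (i n b : Int) (hi : 1 ≤ i) (h : b < powMin i n b) : b < i ^ n.toNat := by
  by_cases h1 : i = 1
  · subst h1; simpa [powMin] using h
  · have hi2 : 2 ≤ i := by omega
    have := powMinGo_spec i b hi2 n.toNat 1 (by omega)
    simp only [one_mul] at this
    unfold powMin at h
    simp only [h1, if_false] at h
    by_cases hle : i ^ n.toNat ≤ b
    · simp [hle] at this; omega
    · omega

-- The while-loop of B computes hits ++ filter of the remaining range [i, b].
theorem altLoop_spec (n a b : Int) (hn : 1 ≤ n) :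
    ∀ (fuel : Nat) (i : Int) (hits : List Int), 1 ≤ i → (b + 1 - i).toNat ≤ fuel →
      altLoop n a b i hits fuel
        = (((hits ++ (PySem.List.pyRange i (b + 1) 1).filter (fun j => pyPowBetween j n a b)).length : Int),
           hits ++ (PySem.List.pyRange i (b + 1) 1).filter (fun j => pyPowBetween j n a b)) := by
  intro fuel
  induction fuel with
  | zero =>
    intro i hits hi hf
    have : b + 1 ≤ i := by omega
    rw [PySem.List.pyRange_one_eq_nil this]
    simp [altLoop]
  | succ fuel ih =>
    intro i hits hi hf
    have hn0 : n.toNat ≠ 0 := by omega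
    have h0n : (0:Int) ≤ n := by omega
    show (if powMin i n b > b then _ else _) = _
    by_cases hp : powMin i n b > b
    · -- i^n > b, hence j^n > b for every j in [i, b+1): the filter is empty
      have hib : b < i ^ n.toNat := powMin_gt i n b hi hp
      have hfil : (PySem.List.pyRange i (b + 1) 1).filter (fun j => pyPowBetween j n a b) = [] := by
        apply List.filter_eq_nil_iff.mpr
        intro j hj
        have hij : i ≤ j ∧ j < b + 1 := (PySem.List.mem_pyRange_one).1 hj
        have : i ^ n.toNat ≤ j ^ n.toNat := pow_le_pow_left₀ (by omega) hij.1 n.toNat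
        simp [pyPowBetween, h0n]
        intro _; omega
      simp [hp, hfil]
    · push_neg at hp
      obtain ⟨hpeq, hpow⟩ := powMin_le i n b hi hp
      have hii : i ≤ i ^ n.toNat := le_self_pow₀ hi hn0
      have hib : i < b + 1 := by omega
      rw [PySem.List.pyRange_one_cons hib]
      have hcond : pyPowBetween i n a b = decide (a ≤ i ^ n.toNat) := by
        simp [pyPowBetween, h0n]; intro _; omega
      rw [List.filter_cons]
      have ihr := ih (i + 1) (if powMin i n b ≥ a then hits ++ [i] else hits) (by omega) (by omega)
      rw [if_neg (not_lt.mpr hp)]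
      by_cases ha : a ≤ i ^ n.toNat
      · have hge : powMin i n b ≥ a := by omega
        rw [if_pos hge] at ihr ⊢
        rw [ihr, hcond]
        simp [ha]
      · have hge : ¬ powMin i n b ≥ a := by omega
        rw [if_neg hge] at ihr ⊢
        rw [ihr, hcond]
        simp [ha]

theorem filter_all_true (b a n : Int) (hb : 1 ≤ b)
    (hall : ∀ j, 1 ≤ j → j ≤ b → pyPowBetween j n a b = true) :
    (PySem.List.pyRange 1 (b + 1) 1).filter (fun j => pyPowBetween j n a b)
      = PySem.List.pyRange 1 (b + 1) 1 := by
  apply List.filter_eq_self.mpr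
  intro j hj
  have := (PySem.List.mem_pyRange_one).1 hj
  exact hall j this.1 (by omega)

theorem filter_all_false (b a n : Int)
    (hall : ∀ j, 1 ≤ j → j ≤ b → pyPowBetween j n a b = false) :
    (PySem.List.pyRange 1 (b + 1) 1).filter (fun j => pyPowBetween j n a b) = [] := by
  apply List.filter_eq_nil_iff.mpr
  intro j hj
  have := (PySem.List.mem_pyRange_one).1 hj
  simp [hall j this.1 (by omega)]

-- ===== VERDICT (by name: the statement is the Claim_ definition above) =====
theorem power_range_spec : Claim_equal_power_range := by
  intro n a b _
  show power_range n a b = power_range_alt n a b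
  unfold power_range power_range_alt
  rw [foldA]
  simp only [zero_add, List.nil_append]
  by_cases hb : b < 1
  · rw [PySem.List.pyRange_one_eq_nil (by omega)]
    simp [hb]
  · push_neg at hb
    simp only [not_lt.mpr hb, if_neg, not_lt, hb, if_false]
    by_cases hn0 : n = 0
    · subst hn0
      simp only [if_pos]
      by_cases ha : a ≤ 1
      · rw [filter_all_true b a 0 hb (by intro j hj hjb; simp [pyPowBetween]; omega)]
        simp [ha]
        omega
      · rw [filter_all_false b a 0 (by intro j hj hjb; simp [pyPowBetween]; omega)]
        simp [ha]
    · simp only [hn0, if_neg, not_false_iff]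
      by_cases hneg : n < 0
      · simp only [hneg, if_pos]
        have hcond : ∀ j, 1 ≤ j → j ≤ b →
            pyPowBetween j n a b = (if j = 1 then decide (a ≤ 1) else decide (a ≤ 0)) := by
          intro j hj hjb
          simp [pyPowBetween, not_le.mpr hneg]
          split_ifs <;> simp <;> omega
        by_cases ha0 : a ≤ 0
        · rw [filter_all_true b a n hb (by intro j hj hjb; rw [hcond j hj hjb]; split_ifs <;> simp <;> omega)]
          simp [ha0]
          omega
        · by_cases ha1 : a = 1
          · subst ha1
            have h1b : (1:Int) < b + 1 := by omega
            rw [PySem.List.pyRange_one_cons h1b, List.filter_cons]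
            rw [hcond 1 le_rfl hb]
            have hrest : (PySem.List.pyRange 2 (b + 1) 1).filter (fun j => pyPowBetween j n 1 b) = [] := by
              apply List.filter_eq_nil_iff.mpr
              intro j hj
              have := (PySem.List.mem_pyRange_one).1 hj
              rw [hcond j (by omega) (by omega)]
              split_ifs <;> simp <;> omega
            simp [hrest, ha0]
          · rw [filter_all_false b a n (by intro j hj hjb; rw [hcond j hj hjb]; split_ifs <;> simp <;> omega)]
            simp [ha0, ha1]
      · have hn1 : 1 ≤ n := by omega
        simp only [hneg, if_neg, not_false_iff]
        rw [altLoop_spec n a b hn1 (b + 1).toNat 1 [] le_rfl (by omega)]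
        simp
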